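-- pv_equiv track=rewrite | github.com/LuTianTian001/openclaw-model-admin | server.py | _normalize_base_url_for_model_test
-- ===== SOURCE A (Python) =====
-- def _normalize_base_url_for_model_test(raw: str) -> str:
--     """对齐 ClawPanel（Rust normalize_base_url / dev-api _normalizeBaseUrl）：去尾缀、Ollama 11434 补 /v1。"""
--     base = (raw or "").strip().rstrip("/")
--     for suf in (
--         "/api/chat",
--         "/api/generate",
--         "/api/tags",
--         "/api",
--         "/chat/completions",
--         "/completions",
--         "/responses",
--         "/messages",
--         "/models",
--     ):
--         if base.endswith(suf):
--             base = base[: -len(suf)]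
--             break
--     base = base.rstrip("/")
--     if base.endswith(":11434"):
--         return f"{base}/v1"
--     return base
-- ===== SOURCE B (Python) =====
-- def _normalize_base_url_for_model_test(raw: str) -> str:
--     """Segment-based rewrite: split on '/', drop the known trailing one- or two-segment
--     suffix by list surgery, rejoin — instead of scanning a tuple of suffix strings."""
--     base = (raw or "").strip().rstrip("/")
--     segs = base.split("/")
--     n = len(segs)
--     if n >= 3 and (segs[-2], segs[-1]) in (
--         ("api", "chat"), ("api", "generate"), ("api", "tags"), ("chat", "completions"),
--     ):
--         segs = segs[:-2]
--     elif n >= 2 and segs[-1] in ("api", "completions", "responses", "messages", "models"):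
--         segs = segs[:-1]
--     base = "/".join(segs).rstrip("/")
--     if base.endswith(":11434"):
--         return base + "/v1"
--     return base
-- ===== Notes on version B (the rewrite author's own statement) =====
-- stated objective: alternative
-- what changed: B splits the URL into slash-separated segments and drops the recognised trailing one or two path segments by list surgery before rejoining, instead of A's first-match scan over a tuple of nine suffix strings with endswith and negative slicing.
import Mathlib
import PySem

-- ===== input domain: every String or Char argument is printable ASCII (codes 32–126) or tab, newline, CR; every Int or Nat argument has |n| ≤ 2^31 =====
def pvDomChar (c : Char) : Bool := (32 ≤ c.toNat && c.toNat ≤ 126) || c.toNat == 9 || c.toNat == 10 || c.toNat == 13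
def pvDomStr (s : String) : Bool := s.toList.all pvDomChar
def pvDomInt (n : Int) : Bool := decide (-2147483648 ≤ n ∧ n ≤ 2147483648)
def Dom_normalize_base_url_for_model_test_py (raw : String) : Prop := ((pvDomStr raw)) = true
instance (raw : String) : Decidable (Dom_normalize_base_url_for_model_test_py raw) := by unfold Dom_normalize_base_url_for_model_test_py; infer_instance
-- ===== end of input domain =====

-- B re-implements the suffix-stripping by segment surgery (split at slashes, drop the known trailing
-- one/two segments, rejoin) instead of A's first-match scan over a tuple of suffix strings;
-- objective: alternative (same cost, different algorithm). Return values proved equal on Dom.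

-- ===== PORT A =====
-- Python rstrip("/") (PySem has no rstrip-with-argument): drop trailing '/' characters — exact.
def pvRstripSlash (cs : List Char) : List Char := (cs.reverse.dropWhile (· == '/')).reverse

-- the tuple of suffixes, in A's order
def pvSuffixes : List (List Char) :=
  ["/api/chat".toList, "/api/generate".toList, "/api/tags".toList, "/api".toList,
   "/chat/completions".toList, "/completions".toList, "/responses".toList,
   "/messages".toList, "/models".toList]

-- A's for-loop: first suffix with base.endswith(suf) is cut off (base[:-len(suf)]), then break
def pvStripLoop : List (List Char) → List Char → List Char
  | [], base => base
  | suf :: rest, base =>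
      if PySem.Chars.endswith base suf then PySem.List.slice base none (some (-(suf.length : Int)))
      else pvStripLoop rest base

def normalize_base_url_for_model_test_py (raw : String) : String :=
  -- base = (raw or "").strip().rstrip("/")   ("raw or ''" is the identity on str)
  let base := pvRstripSlash (PySem.Chars.strip raw.toList)
  -- the for-loop over the suffix tuple
  let base := pvStripLoop pvSuffixes base
  -- base = base.rstrip("/")
  let base := pvRstripSlash base
  -- if base.endswith(":11434"): return f"{base}/v1"
  if PySem.Chars.endswith base ":11434".toList then String.ofList (base ++ "/v1".toList)
  else String.ofList base

-- ===== PORT B =====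
def pvPairs : List (List Char × List Char) :=
  [("api".toList, "chat".toList), ("api".toList, "generate".toList),
   ("api".toList, "tags".toList), ("chat".toList, "completions".toList)]

def pvSingles : List (List Char) :=
  ["api".toList, "completions".toList, "responses".toList, "messages".toList, "models".toList]

def normalize_base_url_for_model_test_py_alt (raw : String) : String :=
  -- base = (raw or "").strip().rstrip("/")
  let base := pvRstripSlash (PySem.Chars.strip raw.toList)
  -- segs = base.split("/"); n = len(segs)
  let segs := PySem.Chars.splitOn base ['/']
  let n := segs.length
  -- drop the recognised trailing two segments, else the recognised trailing one segment
  let segs' :=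
    if 3 ≤ n ∧ (PySem.List.pyGetD segs (-2) [], PySem.List.pyGetD segs (-1) []) ∈ pvPairs then
      segs.dropLast.dropLast
    else if 2 ≤ n ∧ PySem.List.pyGetD segs (-1) [] ∈ pvSingles then
      segs.dropLast
    else segs
  -- base = "/".join(segs).rstrip("/")
  let base := pvRstripSlash (PySem.Chars.join ['/'] segs')
  -- if base.endswith(":11434"): return base + "/v1"
  if PySem.Chars.endswith base ":11434".toList then String.ofList (base ++ "/v1".toList)
  else String.ofList base

-- ===== PRECONDITION & SPEC =====
def Spec_normalize_base_url_for_model_test_py (raw : String) (out : String) : Prop := out = normalize_base_url_for_model_test_py_alt raw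
instance (raw : String) (out : String) : Decidable (Spec_normalize_base_url_for_model_test_py raw out) := by unfold Spec_normalize_base_url_for_model_test_py; infer_instance

-- ===== CLAIM (what is proved, stated in full; the proofs are below) =====
def Claim_equal_normalize_base_url_for_model_test_py : Prop := ∀ (raw : String), Dom_normalize_base_url_for_model_test_py raw → Spec_normalize_base_url_for_model_test_py raw (normalize_base_url_for_model_test_py raw)

-- ===== LEMMAS AND PROOFS =====

def pvSplit : List Char → List Char → List (List Char)
  | pre, [] => [pre]
  | pre, c :: rest => if c = '/' then pre :: pvSplit [] rest else pvSplit (pre ++ [c]) rest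

lemma pvGoSpec (fuel : Nat) : ∀ (l cur : List Char) (acc : List (List Char)), l.length < fuel →
    PySem.Chars.splitOn.go ['/'] fuel l cur acc = acc.reverse ++ pvSplit cur.reverse l := by
  induction fuel with
  | zero => intro l cur acc h; omega
  | succ f ih =>
    intro l cur acc h
    cases l with
    | nil => simp [PySem.Chars.splitOn.go, pvSplit]
    | cons c rest =>
      rw [PySem.Chars.splitOn.go]
      by_cases hc : c = '/'
      · subst hc
        rw [if_pos (by simp [List.isPrefixOf])]
        rw [ih _ _ _ (by simp at h ⊢; omega)]
        simp [pvSplit]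
      · rw [if_neg (by simp [List.isPrefixOf]; exact fun h => hc h.symm)]
        rw [ih _ _ _ (by simp at h ⊢; omega)]
        simp [pvSplit, hc]

lemma pvSplitOn_eq (s : List Char) : PySem.Chars.splitOn s ['/'] = pvSplit [] s := by
  rw [PySem.Chars.splitOn, pvGoSpec _ _ _ _ (by omega)]
  simp

lemma pvSplit_ne_nil (l : List Char) : ∀ pre, pvSplit pre l ≠ [] := by
  induction l with
  | nil => intro pre; simp [pvSplit]
  | cons c rest ih =>
    intro pre
    by_cases hc : c = '/' <;> simp [pvSplit, hc, ih]

lemma pvIntercalate_cons (x : List Char) (S : List (List Char)) (h : S ≠ []) :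
    List.intercalate ['/'] (x :: S) = x ++ '/' :: List.intercalate ['/'] S := by
  cases S with
  | nil => exact absurd rfl h
  | cons y t => simp [List.intercalate]

lemma pvIntercalate_concat (xs : List (List Char)) (w : List Char) (h : xs ≠ []) :
    List.intercalate ['/'] (xs ++ [w]) = List.intercalate ['/'] xs ++ '/' :: w := by
  induction xs with
  | nil => exact absurd rfl h
  | cons x t ih =>
    cases t with
    | nil => simp [List.intercalate]
    | cons y t' =>
      rw [List.cons_append, pvIntercalate_cons x (y :: t' ++ [w]) (by simp),
        pvIntercalate_cons x (y :: t') (by simp), ih (by simp)]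
      simp

lemma pvJoin_pvSplit (l : List Char) : ∀ pre, List.intercalate ['/'] (pvSplit pre l) = pre ++ l := by
  induction l with
  | nil => intro pre; simp [pvSplit, List.intercalate]
  | cons c rest ih =>
    intro pre
    by_cases hc : c = '/'
    · subst hc
      rw [pvSplit, if_pos rfl, pvIntercalate_cons _ _ (pvSplit_ne_nil _ _), ih]
      simp
    · rw [pvSplit, if_neg hc, ih]
      simp

lemma pvSplit_noSlash (m : List Char) (hm : ('/' : Char) ∉ m) : ∀ pre, pvSplit pre m = [pre ++ m] := by
  induction m with
  | nil => intro pre; simp [pvSplit]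
  | cons c rest ih =>
    intro pre
    have hc : c ≠ '/' := fun h => hm (h ▸ List.mem_cons_self ..)
    rw [pvSplit, if_neg hc, ih (fun h => hm (List.mem_cons_of_mem _ h))]
    simp

lemma pvSplit_appendSep (m : List Char) (hm : ('/' : Char) ∉ m) (l : List Char) :
    ∀ pre, pvSplit pre (l ++ '/' :: m) = pvSplit pre l ++ [m] := by
  induction l with
  | nil =>
    intro pre
    simp [pvSplit, pvSplit_noSlash m hm]
  | cons c rest ih =>
    intro pre
    by_cases hc : c = '/'
    · subst hc
      simp only [List.cons_append, pvSplit, ih]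
      simp
    · rw [List.cons_append, pvSplit, if_neg hc, ih, pvSplit, if_neg hc]

lemma pvE1 (base u : List Char) (hu : ('/' : Char) ∉ u) :
    PySem.Chars.endswith base ('/' :: u) = true ↔
      2 ≤ (pvSplit [] base).length ∧ (pvSplit [] base).getLast? = some u := by
  rw [PySem.Chars.endswith_iff]
  constructor
  · rintro ⟨l, rfl⟩
    rw [show l ++ '/' :: u = l ++ '/' :: u from rfl, pvSplit_appendSep u hu l]
    have h1 := pvSplit_ne_nil l []
    constructor
    · have := List.length_pos_of_ne_nil h1; simp; omega
    · simp
  · rintro ⟨hlen, hlast⟩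
    obtain ⟨X, hX⟩ := List.getLast?_eq_some_iff.mp hlast
    have hXne : X ≠ [] := by
      intro h; rw [h] at hX; rw [hX] at hlen; simp at hlen
    have hbase : base = List.intercalate ['/'] X ++ '/' :: u := by
      have := pvJoin_pvSplit base []
      rw [hX, pvIntercalate_concat X u hXne] at this
      simpa using this.symm
    exact ⟨_, hbase.symm⟩

lemma pvE2 (base u v : List Char) (hu : ('/' : Char) ∉ u) (hv : ('/' : Char) ∉ v) :
    PySem.Chars.endswith base ('/' :: u ++ '/' :: v) = true ↔
      3 ≤ (pvSplit [] base).length ∧ (pvSplit [] base).getLast? = some v ∧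
        (pvSplit [] base).dropLast.getLast? = some u := by
  rw [PySem.Chars.endswith_iff]
  constructor
  · rintro ⟨l, rfl⟩
    have hsplit : pvSplit [] (l ++ ('/' :: u ++ '/' :: v)) = pvSplit [] l ++ [u, v] := by
      rw [show l ++ ('/' :: u ++ '/' :: v) = (l ++ '/' :: u) ++ '/' :: v by simp,
        pvSplit_appendSep v hv, pvSplit_appendSep u hu]
      simp
    rw [hsplit]
    have h1 := pvSplit_ne_nil l []
    have hl := List.length_pos_of_ne_nil h1
    refine ⟨by simp; omega, by simp, ?_⟩
    rw [show pvSplit [] l ++ [u, v] = (pvSplit [] l ++ [u]) ++ [v] by simp, List.dropLast_concat]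
    simp
  · rintro ⟨hlen, hlast, hslast⟩
    obtain ⟨X, hX⟩ := List.getLast?_eq_some_iff.mp hlast
    rw [hX, List.dropLast_concat] at hslast
    obtain ⟨Y, hY⟩ := List.getLast?_eq_some_iff.mp hslast
    have hYne : Y ≠ [] := by
      intro h; rw [h] at hY; rw [hX, hY] at hlen; simp at hlen
    have hbase : base = List.intercalate ['/'] Y ++ '/' :: u ++ '/' :: v := by
      have := pvJoin_pvSplit base []
      rw [hX, hY, pvIntercalate_concat (Y ++ [u]) v (by simp),
        pvIntercalate_concat Y u hYne] at this
      simpa using this.symm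
    exact ⟨List.intercalate ['/'] Y, by rw [hbase]; simp⟩

lemma pvDecomp1 {α : Type} (S : List α) (h : 1 ≤ S.length) :
    ∃ X w, S = X ++ [w] ∧ X.length + 1 = S.length := by
  have hne : S ≠ [] := by intro hh; rw [hh] at h; simp at h
  refine ⟨S.dropLast, S.getLast hne, (List.dropLast_append_getLast hne).symm, ?_⟩
  simp [List.length_dropLast]; omega

lemma pvDecomp2 {α : Type} (S : List α) (h : 2 ≤ S.length) :
    ∃ Y a w, S = Y ++ [a, w] ∧ Y.length + 2 = S.length := by
  obtain ⟨X, w, rfl, hX⟩ := pvDecomp1 S (by omega)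
  simp at hX
  obtain ⟨Y, a, rfl, hY⟩ := pvDecomp1 X (by simp at h; omega)
  exact ⟨Y, a, w, by simp, by simp⟩

lemma pvGetNegOne (X : List (List Char)) (a : List Char) :
    PySem.List.pyGetD (X ++ [a]) (-1) [] = a := by
  simp [PySem.List.pyGetD, PySem.List.pyGet?, PySem.List.pyIdx?]

lemma pvGetNegTwo (X : List (List Char)) (a w : List Char) :
    PySem.List.pyGetD (X ++ [a, w]) (-2) [] = a := by
  simp [PySem.List.pyGetD, PySem.List.pyGet?, PySem.List.pyIdx?]

lemma pvSliceSuffix (P S : List Char) (h : S ≠ []) :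
    PySem.List.slice (P ++ S) none (some (-(S.length : Int))) = P := by
  have hs : 0 < S.length := List.length_pos_of_ne_nil h
  simp only [PySem.List.slice, PySem.List.clampIdx, List.length_append]
  rw [if_pos (by omega), if_neg (by omega)]
  simp

-- a pair suffix does not match when the last segment differs

lemma pvMissPair (base u v w' : List Char) (hu : ('/' : Char) ∉ u) (hv : ('/' : Char) ∉ v)
    (hlast : (pvSplit [] base).getLast? = some w') (hne : w' ≠ v) :
    ¬ (PySem.Chars.endswith base ('/' :: u ++ '/' :: v) = true) := by
  intro h
  obtain ⟨_, hl, _⟩ := (pvE2 base u v hu hv).mp h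
  rw [hlast] at hl
  exact hne (Option.some.inj hl)

-- a single suffix does not match when the last segment differs

lemma pvMissSingle (base u w' : List Char) (hu : ('/' : Char) ∉ u)
    (hlast : (pvSplit [] base).getLast? = some w') (hne : w' ≠ u) :
    ¬ (PySem.Chars.endswith base ('/' :: u) = true) := by
  intro h
  obtain ⟨_, hl⟩ := (pvE1 base u hu).mp h
  rw [hlast] at hl
  exact hne (Option.some.inj hl)

-- a pair suffix (from pvPairs) does not match when B's pair condition fails

lemma pvMissPair' (base u v : List Char) (hu : ('/' : Char) ∉ u) (hv : ('/' : Char) ∉ v)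
    (h1 : ¬ (3 ≤ (pvSplit [] base).length ∧
      (PySem.List.pyGetD (pvSplit [] base) (-2) [], PySem.List.pyGetD (pvSplit [] base) (-1) []) ∈ pvPairs))
    (hin : (u, v) ∈ pvPairs) :
    ¬ (PySem.Chars.endswith base ('/' :: u ++ '/' :: v) = true) := by
  intro h
  obtain ⟨hlen, hl, hsl⟩ := (pvE2 base u v hu hv).mp h
  obtain ⟨Y, a, w, hY, hlen2⟩ := pvDecomp2 (pvSplit [] base) (by omega)
  rw [hY] at hl hsl
  rw [show Y ++ [a, w] = (Y ++ [a]) ++ [w] by simp, List.dropLast_concat] at hsl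
  simp at hl hsl
  exact h1 ⟨hlen, by rw [hY, pvGetNegTwo, show Y ++ [a, w] = (Y ++ [a]) ++ [w] by simp, pvGetNegOne, hsl, hl]; exact hin⟩

-- a single suffix (from pvSingles) does not match when B's single condition fails

lemma pvMissSingle' (base u : List Char) (hu : ('/' : Char) ∉ u)
    (h2 : ¬ (2 ≤ (pvSplit [] base).length ∧
      PySem.List.pyGetD (pvSplit [] base) (-1) [] ∈ pvSingles))
    (hin : u ∈ pvSingles) :
    ¬ (PySem.Chars.endswith base ('/' :: u) = true) := by
  intro h
  obtain ⟨hlen, hl⟩ := (pvE1 base u hu).mp h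
  obtain ⟨X, w, hX, hlen2⟩ := pvDecomp1 (pvSplit [] base) (by omega)
  rw [hX] at hl; simp at hl
  exact h2 ⟨hlen, by rw [hX, pvGetNegOne, hl]; exact hin⟩

-- a matching pair suffix: endswith holds and the cut equals the join of the leading segments

lemma pvHitPair (base u v : List Char) (Y : List (List Char))
    (hY : pvSplit [] base = Y ++ [u, v]) (hYne : Y ≠ []) :
    PySem.Chars.endswith base ('/' :: u ++ '/' :: v) = true ∧
      PySem.List.slice base none (some (-((('/' :: u ++ '/' :: v) : List Char).length : Int))) =
        List.intercalate ['/'] Y := by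
  have hbase : base = List.intercalate ['/'] Y ++ ('/' :: u ++ '/' :: v) := by
    have := pvJoin_pvSplit base []
    rw [hY, show Y ++ [u, v] = (Y ++ [u]) ++ [v] by simp,
      pvIntercalate_concat (Y ++ [u]) v (by simp), pvIntercalate_concat Y u hYne] at this
    simp at this
    rw [← this]; simp
  constructor
  · rw [PySem.Chars.endswith_iff]; exact ⟨_, hbase.symm⟩
  · rw [hbase, pvSliceSuffix _ _ (by simp)]

-- a matching single suffix

lemma pvHitSingle (base u : List Char) (X : List (List Char))
    (hX : pvSplit [] base = X ++ [u]) (hXne : X ≠ []) :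
    PySem.Chars.endswith base ('/' :: u) = true ∧
      PySem.List.slice base none (some (-((('/' :: u) : List Char).length : Int))) =
        List.intercalate ['/'] X := by
  have hbase : base = List.intercalate ['/'] X ++ ('/' :: u) := by
    have := pvJoin_pvSplit base []
    rw [hX, pvIntercalate_concat X u hXne] at this
    simpa using this.symm
  constructor
  · rw [PySem.Chars.endswith_iff]; exact ⟨_, hbase.symm⟩
  · rw [hbase, pvSliceSuffix _ _ (by simp)]

lemma pvMid (base : List Char) :
    pvStripLoop pvSuffixes base =
      PySem.Chars.join ['/']
        (if 3 ≤ (PySem.Chars.splitOn base ['/']).length ∧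
            (PySem.List.pyGetD (PySem.Chars.splitOn base ['/']) (-2) [],
             PySem.List.pyGetD (PySem.Chars.splitOn base ['/']) (-1) []) ∈ pvPairs then
          (PySem.Chars.splitOn base ['/']).dropLast.dropLast
        else if 2 ≤ (PySem.Chars.splitOn base ['/']).length ∧
            PySem.List.pyGetD (PySem.Chars.splitOn base ['/']) (-1) [] ∈ pvSingles then
          (PySem.Chars.splitOn base ['/']).dropLast
        else PySem.Chars.splitOn base ['/']) := by
  rw [pvSplitOn_eq]
  by_cases h1 : 3 ≤ (pvSplit [] base).length ∧
      (PySem.List.pyGetD (pvSplit [] base) (-2) [],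
       PySem.List.pyGetD (pvSplit [] base) (-1) []) ∈ pvPairs
  · rw [if_pos h1]
    obtain ⟨hlen, hpair⟩ := h1
    obtain ⟨Y, a, w, hY, hlen2⟩ := pvDecomp2 (pvSplit [] base) (by omega)
    have hYne : Y ≠ [] := by
      intro hh; rw [hh] at hlen2; simp at hlen2; omega
    rw [hY, pvGetNegTwo, show Y ++ [a, w] = (Y ++ [a]) ++ [w] by simp, pvGetNegOne] at hpair
    rw [hY, show Y ++ [a, w] = (Y ++ [a]) ++ [w] by simp, List.dropLast_concat,
      List.dropLast_concat]
    have hlast : (pvSplit [] base).getLast? = some w := by rw [hY]; simp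
    simp only [pvPairs, List.mem_cons, List.not_mem_nil, or_false, Prod.mk.injEq] at hpair
    rcases hpair with ⟨ha, hw⟩ | ⟨ha, hw⟩ | ⟨ha, hw⟩ | ⟨ha, hw⟩ <;> subst ha <;> subst hw <;>
      simp only [pvSuffixes, pvStripLoop]
    · -- ("api","chat")
      rw [show ("/api/chat".toList : List Char) = '/' :: "api".toList ++ '/' :: "chat".toList
        by decide]
      obtain ⟨hend, hres⟩ := pvHitPair base "api".toList "chat".toList Y hY hYne
      rw [if_pos hend, hres]; simp [PySem.Chars.join]
    · -- ("api","generate")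
      rw [show ("/api/chat".toList : List Char) = '/' :: "api".toList ++ '/' :: "chat".toList
        by decide,
        if_neg (pvMissPair base _ _ _ (by decide) (by decide) hlast (by decide)),
        show ("/api/generate".toList : List Char) = '/' :: "api".toList ++ '/' :: "generate".toList
        by decide]
      obtain ⟨hend, hres⟩ := pvHitPair base "api".toList "generate".toList Y hY hYne
      rw [if_pos hend, hres]; simp [PySem.Chars.join]
    · -- ("api","tags")
      rw [show ("/api/chat".toList : List Char) = '/' :: "api".toList ++ '/' :: "chat".toList
        by decide,
        if_neg (pvMissPair base _ _ _ (by decide) (by decide) hlast (by decide)),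
        show ("/api/generate".toList : List Char) = '/' :: "api".toList ++ '/' :: "generate".toList
        by decide,
        if_neg (pvMissPair base _ _ _ (by decide) (by decide) hlast (by decide)),
        show ("/api/tags".toList : List Char) = '/' :: "api".toList ++ '/' :: "tags".toList
        by decide]
      obtain ⟨hend, hres⟩ := pvHitPair base "api".toList "tags".toList Y hY hYne
      rw [if_pos hend, hres]; simp [PySem.Chars.join]
    · -- ("chat","completions")
      rw [show ("/api/chat".toList : List Char) = '/' :: "api".toList ++ '/' :: "chat".toList
        by decide,
        if_neg (pvMissPair base _ _ _ (by decide) (by decide) hlast (by decide)),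
        show ("/api/generate".toList : List Char) = '/' :: "api".toList ++ '/' :: "generate".toList
        by decide,
        if_neg (pvMissPair base _ _ _ (by decide) (by decide) hlast (by decide)),
        show ("/api/tags".toList : List Char) = '/' :: "api".toList ++ '/' :: "tags".toList
        by decide,
        if_neg (pvMissPair base _ _ _ (by decide) (by decide) hlast (by decide)),
        show ("/api".toList : List Char) = '/' :: "api".toList by decide,
        if_neg (pvMissSingle base _ _ (by decide) hlast (by decide)),
        show ("/chat/completions".toList : List Char) =
          '/' :: "chat".toList ++ '/' :: "completions".toList by decide]
      obtain ⟨hend, hres⟩ := pvHitPair base "chat".toList "completions".toList Y hY hYne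
      rw [if_pos hend, hres]; simp [PySem.Chars.join]
  · rw [if_neg h1]
    by_cases h2 : 2 ≤ (pvSplit [] base).length ∧
        PySem.List.pyGetD (pvSplit [] base) (-1) [] ∈ pvSingles
    · rw [if_pos h2]
      obtain ⟨hlen, hsing⟩ := h2
      obtain ⟨X, w, hX, hlen1⟩ := pvDecomp1 (pvSplit [] base) (by omega)
      have hXne : X ≠ [] := by
        intro hh; rw [hh] at hlen1; simp at hlen1; omega
      rw [hX, pvGetNegOne] at hsing
      rw [hX, List.dropLast_concat]
      have hlast : (pvSplit [] base).getLast? = some w := by rw [hX]; simp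
      simp only [pvSingles, List.mem_cons, List.not_mem_nil, or_false] at hsing
      rcases hsing with hw | hw | hw | hw | hw <;> subst hw <;>
        simp only [pvSuffixes, pvStripLoop] <;>
        rw [show ("/api/chat".toList : List Char) = '/' :: "api".toList ++ '/' :: "chat".toList
          by decide,
          if_neg (pvMissPair base _ _ _ (by decide) (by decide) hlast (by decide)),
          show ("/api/generate".toList : List Char) = '/' :: "api".toList ++ '/' :: "generate".toList
          by decide,
          if_neg (pvMissPair base _ _ _ (by decide) (by decide) hlast (by decide)),
          show ("/api/tags".toList : List Char) = '/' :: "api".toList ++ '/' :: "tags".toList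
          by decide,
          if_neg (pvMissPair base _ _ _ (by decide) (by decide) hlast (by decide)),
          show ("/api".toList : List Char) = '/' :: "api".toList by decide]
      · -- "api"
        obtain ⟨hend, hres⟩ := pvHitSingle base "api".toList X hX hXne
        rw [if_pos hend, hres]; simp [PySem.Chars.join]
      · -- "completions"
        rw [if_neg (pvMissSingle base _ _ (by decide) hlast (by decide)),
          show ("/chat/completions".toList : List Char) =
            '/' :: "chat".toList ++ '/' :: "completions".toList by decide,
          if_neg (pvMissPair' base _ _ (by decide) (by decide) h1 (by decide)),
          show ("/completions".toList : List Char) = '/' :: "completions".toList by decide]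
        obtain ⟨hend, hres⟩ := pvHitSingle base "completions".toList X hX hXne
        rw [if_pos hend, hres]; simp [PySem.Chars.join]
      · -- "responses"
        rw [if_neg (pvMissSingle base _ _ (by decide) hlast (by decide)),
          show ("/chat/completions".toList : List Char) =
            '/' :: "chat".toList ++ '/' :: "completions".toList by decide,
          if_neg (pvMissPair base _ _ _ (by decide) (by decide) hlast (by decide)),
          show ("/completions".toList : List Char) = '/' :: "completions".toList by decide,
          if_neg (pvMissSingle base _ _ (by decide) hlast (by decide)),
          show ("/responses".toList : List Char) = '/' :: "responses".toList by decide]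
        obtain ⟨hend, hres⟩ := pvHitSingle base "responses".toList X hX hXne
        rw [if_pos hend, hres]; simp [PySem.Chars.join]
      · -- "messages"
        rw [if_neg (pvMissSingle base _ _ (by decide) hlast (by decide)),
          show ("/chat/completions".toList : List Char) =
            '/' :: "chat".toList ++ '/' :: "completions".toList by decide,
          if_neg (pvMissPair base _ _ _ (by decide) (by decide) hlast (by decide)),
          show ("/completions".toList : List Char) = '/' :: "completions".toList by decide,
          if_neg (pvMissSingle base _ _ (by decide) hlast (by decide)),
          show ("/responses".toList : List Char) = '/' :: "responses".toList by decide,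
          if_neg (pvMissSingle base _ _ (by decide) hlast (by decide)),
          show ("/messages".toList : List Char) = '/' :: "messages".toList by decide]
        obtain ⟨hend, hres⟩ := pvHitSingle base "messages".toList X hX hXne
        rw [if_pos hend, hres]; simp [PySem.Chars.join]
      · -- "models"
        rw [if_neg (pvMissSingle base _ _ (by decide) hlast (by decide)),
          show ("/chat/completions".toList : List Char) =
            '/' :: "chat".toList ++ '/' :: "completions".toList by decide,
          if_neg (pvMissPair base _ _ _ (by decide) (by decide) hlast (by decide)),
          show ("/completions".toList : List Char) = '/' :: "completions".toList by decide,
          if_neg (pvMissSingle base _ _ (by decide) hlast (by decide)),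
          show ("/responses".toList : List Char) = '/' :: "responses".toList by decide,
          if_neg (pvMissSingle base _ _ (by decide) hlast (by decide)),
          show ("/messages".toList : List Char) = '/' :: "messages".toList by decide,
          if_neg (pvMissSingle base _ _ (by decide) hlast (by decide)),
          show ("/models".toList : List Char) = '/' :: "models".toList by decide]
        obtain ⟨hend, hres⟩ := pvHitSingle base "models".toList X hX hXne
        rw [if_pos hend, hres]; simp [PySem.Chars.join]
    · rw [if_neg h2]
      simp only [pvSuffixes, pvStripLoop]
      rw [show ("/api/chat".toList : List Char) = '/' :: "api".toList ++ '/' :: "chat".toList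
        by decide,
        if_neg (pvMissPair' base _ _ (by decide) (by decide) h1 (by decide)),
        show ("/api/generate".toList : List Char) = '/' :: "api".toList ++ '/' :: "generate".toList
        by decide,
        if_neg (pvMissPair' base _ _ (by decide) (by decide) h1 (by decide)),
        show ("/api/tags".toList : List Char) = '/' :: "api".toList ++ '/' :: "tags".toList
        by decide,
        if_neg (pvMissPair' base _ _ (by decide) (by decide) h1 (by decide)),
        show ("/api".toList : List Char) = '/' :: "api".toList by decide,
        if_neg (pvMissSingle' base _ (by decide) h2 (by decide)),
        show ("/chat/completions".toList : List Char) =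
          '/' :: "chat".toList ++ '/' :: "completions".toList by decide,
        if_neg (pvMissPair' base _ _ (by decide) (by decide) h1 (by decide)),
        show ("/completions".toList : List Char) = '/' :: "completions".toList by decide,
        if_neg (pvMissSingle' base _ (by decide) h2 (by decide)),
        show ("/responses".toList : List Char) = '/' :: "responses".toList by decide,
        if_neg (pvMissSingle' base _ (by decide) h2 (by decide)),
        show ("/messages".toList : List Char) = '/' :: "messages".toList by decide,
        if_neg (pvMissSingle' base _ (by decide) h2 (by decide)),
        show ("/models".toList : List Char) = '/' :: "models".toList by decide,
        if_neg (pvMissSingle' base _ (by decide) h2 (by decide))]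
      have := pvJoin_pvSplit base []
      simp [PySem.Chars.join]
      simpa using this.symm

-- ===== VERDICT (by name: the statement is the Claim_ definition above) =====
theorem normalize_base_url_for_model_test_py_spec : Claim_equal_normalize_base_url_for_model_test_py := by
  intro raw _
  unfold Spec_normalize_base_url_for_model_test_py
  unfold normalize_base_url_for_model_test_py normalize_base_url_for_model_test_py_alt
  simp only []
  rw [pvMid]
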